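-- pv_equiv track=rewrite | github.com/amitkumar0509/DSA | stack/nextgreaternextsmaller.py | nextSmallerOfNextGreater
-- ===== SOURCE A (Python) =====
-- def nextGreater(arr):
--     n = len(arr)
--     nge = [-1] * n
--     stack = []
--
--     for i in range(n-1, -1, -1):
--         while stack and stack[-1] <= arr[i]:
--             stack.pop()
--
--         if stack:
--             nge[i] = stack[-1]
--
--         stack.append(arr[i])
--
--     return nge
--
-- def nextSmaller(arr):
--     n = len(arr)
--     nse = [-1] * n
--     stack = []
--
--     for i in range(n-1, -1, -1):
--         while stack and stack[-1] >= arr[i]: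
--             stack.pop()
--
--         if stack:
--             nse[i] = stack[-1]
--
--         stack.append(arr[i])
--
--     return nse
--
-- def nextSmallerOfNextGreater(arr):
--     nge = nextGreater(arr)
--     nse = nextSmaller(arr)
--
--     result = []
--
--     for i in range(len(arr)):
--         if nge[i] == -1:
--             result.append(-1)
--         else:
--             # find index of nge value
--             idx = arr.index(nge[i])
--             result.append(nse[idx])
--
--     return result
-- ===== SOURCE B (Python) =====
-- def nextSmallerOfNextGreater(arr):
--     result = []
--     n = len(arr)
--     for i in range(n):
--         g = -1
--         for j in range(i + 1, n):
--             if arr[j] > arr[i]: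
--                 g = arr[j]
--                 break
--         if g == -1:
--             result.append(-1)
--         else:
--             idx = arr.index(g)
--             s = -1
--             for j in range(idx + 1, n):
--                 if arr[j] < arr[idx]:
--                     s = arr[j]
--                     break
--             result.append(s)
--     return result
-- ===== Notes on version B (the rewrite author's own statement) =====
-- stated objective: alternative
-- what changed: Replaces both right-to-left monotonic-stack passes by direct forward scans: for each i the first strictly greater element of arr[i+1:] is found by a linear scan, then (via arr.index as in A) the next strictly smaller of that index by another linear scan.
import Mathlib
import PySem

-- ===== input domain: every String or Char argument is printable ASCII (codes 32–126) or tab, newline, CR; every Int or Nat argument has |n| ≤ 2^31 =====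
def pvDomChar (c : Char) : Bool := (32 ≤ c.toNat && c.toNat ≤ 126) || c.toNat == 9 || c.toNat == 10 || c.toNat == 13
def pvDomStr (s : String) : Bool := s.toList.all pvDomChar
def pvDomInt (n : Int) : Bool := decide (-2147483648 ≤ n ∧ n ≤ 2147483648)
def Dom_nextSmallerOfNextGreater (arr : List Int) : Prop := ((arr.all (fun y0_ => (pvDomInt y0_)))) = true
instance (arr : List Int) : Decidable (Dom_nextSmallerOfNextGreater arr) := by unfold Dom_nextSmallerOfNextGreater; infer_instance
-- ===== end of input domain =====

-- B replaces both monotonic-stack passes of A by direct forward scans (same O(n^2) cost, plainer structure); return values proved equal on all inputs.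


-- ===== PORT A =====
-- 'while stack and stack[-1] <= arr[i]: stack.pop()'  (stack top = list head)
def popWhileLe (v : Int) : List Int → List Int
  | [] => []
  | t :: rest => if t ≤ v then popWhileLe v rest else t :: rest

-- 'while stack and stack[-1] >= arr[i]: stack.pop()'
def popWhileGe (v : Int) : List Int → List Int
  | [] => []
  | t :: rest => if t ≥ v then popWhileGe v rest else t :: rest

-- one iteration of A's right-to-left loop in nextGreater: pop, record nge[i] (-1 if empty), push arr[i]
def ngeStep (a : Int) (st : List Int × List Int) : List Int × List Int :=
  let stack := popWhileLe a st.2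
  (match stack with
   | [] => (-1) :: st.1
   | t :: _ => t :: st.1, a :: stack)

-- one iteration of A's right-to-left loop in nextSmaller
def nseStep (a : Int) (st : List Int × List Int) : List Int × List Int :=
  let stack := popWhileGe a st.2
  (match stack with
   | [] => (-1) :: st.1
   | t :: _ => t :: st.1, a :: stack)

def nextGreaterA (arr : List Int) : List Int := (arr.foldr ngeStep ([], [])).1

def nextSmallerA (arr : List Int) : List Int := (arr.foldr nseStep ([], [])).1

def nextSmallerOfNextGreater (arr : List Int) : List Int :=
  let nge := nextGreaterA arr
  let nse := nextSmallerA arr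
  (List.range arr.length).foldl
    (fun result i =>
      if nge.getD i 0 = -1 then result ++ [-1]
      else
        match PySem.List.index? arr (nge.getD i 0) with
        | some idx => result ++ [nse.getD idx 0]
        | none => result ++ [0])   -- unreachable: nge[i] ≠ -1 is an element of arr
    []

-- ===== PORT B =====
-- 'for j in range(i+1, n): if arr[j] > arr[i]: g = arr[j]; break'  (g starts at -1)
def scanGreater (arr : List Int) (v : Int) (j : Nat) : Int :=
  if _h : j < arr.length then
    (if arr.getD j 0 > v then arr.getD j 0 else scanGreater arr v (j + 1))
  else -1
termination_by arr.length - j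

-- 'for j in range(idx+1, n): if arr[j] < arr[idx]: s = arr[j]; break'  (s starts at -1)
def scanSmaller (arr : List Int) (v : Int) (j : Nat) : Int :=
  if _h : j < arr.length then
    (if arr.getD j 0 < v then arr.getD j 0 else scanSmaller arr v (j + 1))
  else -1
termination_by arr.length - j

def nextSmallerOfNextGreater_alt (arr : List Int) : List Int :=
  (List.range arr.length).map
    (fun i =>
      let g := scanGreater arr (arr.getD i 0) (i + 1)
      if g = -1 then -1
      else
        let idx := (PySem.List.index? arr g).getD 0
        scanSmaller arr (arr.getD idx 0) (idx + 1))

-- ===== PRECONDITION & SPEC =====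
def Spec_nextSmallerOfNextGreater (arr : List Int) (out : List Int) : Prop := out = nextSmallerOfNextGreater_alt arr
instance (arr : List Int) (out : List Int) : Decidable (Spec_nextSmallerOfNextGreater arr out) := by unfold Spec_nextSmallerOfNextGreater; infer_instance

-- ===== CLAIM (what is proved, stated in full; the proofs are below) =====
def Claim_equal_nextSmallerOfNextGreater : Prop := ∀ (arr : List Int), Dom_nextSmallerOfNextGreater arr → Spec_nextSmallerOfNextGreater arr (nextSmallerOfNextGreater arr)

-- ===== LEMMAS AND PROOFS =====

-- spec view of the two scans: first element of the tail beyond the sentinel comparison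
def firstGreater (v : Int) : List Int → Int
  | [] => -1
  | x :: xs => if x > v then x else firstGreater v xs

def firstSmaller (v : Int) : List Int → Int
  | [] => -1
  | x :: xs => if x < v then x else firstSmaller v xs

lemma scanGreater_eq (arr : List Int) (v : Int) (j : Nat) :
    scanGreater arr v j = firstGreater v (arr.drop j) := by
  induction hk : arr.length - j using Nat.strong_induction_on generalizing j with
  | _ k ih =>
    rw [scanGreater]
    by_cases h : j < arr.length
    · have hdrop : arr.drop j = arr[j] :: arr.drop (j + 1) := List.drop_eq_getElem_cons h
      have hg : arr.getD j 0 = arr[j] := List.getD_eq_getElem arr 0 h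
      rw [dif_pos h, hdrop, firstGreater, hg]
      by_cases hv : arr[j] > v
      · simp [hv]
      · rw [if_neg hv, if_neg hv, ih (arr.length - (j + 1)) (by omega) (j + 1) rfl]
    · rw [dif_neg h, List.drop_eq_nil_of_le (by omega), firstGreater]

lemma scanSmaller_eq (arr : List Int) (v : Int) (j : Nat) :
    scanSmaller arr v j = firstSmaller v (arr.drop j) := by
  induction hk : arr.length - j using Nat.strong_induction_on generalizing j with
  | _ k ih =>
    rw [scanSmaller]
    by_cases h : j < arr.length
    · have hdrop : arr.drop j = arr[j] :: arr.drop (j + 1) := List.drop_eq_getElem_cons h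
      have hg : arr.getD j 0 = arr[j] := List.getD_eq_getElem arr 0 h
      rw [dif_pos h, hdrop, firstSmaller, hg]
      by_cases hv : arr[j] < v
      · simp [hv]
      · rw [if_neg hv, if_neg hv, ih (arr.length - (j + 1)) (by omega) (j + 1) rfl]
    · rw [dif_neg h, List.drop_eq_nil_of_le (by omega), firstSmaller]

-- first value of a (popped) stack, -1 if empty: what A records into nge/nse
def headOr (s : List Int) : Int := match s with | [] => -1 | t :: _ => t

-- spec versions of the two stack passes
def ngeSpec : List Int → List Int
  | [] => []
  | a :: t => firstGreater a t :: ngeSpec t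

def nseSpec : List Int → List Int
  | [] => []
  | a :: t => firstSmaller a t :: nseSpec t

lemma popWhileLe_popWhileLe (a v : Int) (h : a ≤ v) (s : List Int) :
    popWhileLe v (popWhileLe a s) = popWhileLe v s := by
  induction s with
  | nil => rfl
  | cons x xs ih =>
    by_cases hx : x ≤ a
    · simp [popWhileLe, hx, le_trans hx h, ih]
    · simp [popWhileLe, hx]

lemma popWhileGe_popWhileGe (a v : Int) (h : a ≥ v) (s : List Int) :
    popWhileGe v (popWhileGe a s) = popWhileGe v s := by
  induction s with
  | nil => rfl
  | cons x xs ih =>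
    by_cases hx : x ≥ a
    · simp [popWhileGe, hx, le_trans h hx, ih]
    · simp [popWhileGe, hx]

lemma nge_invariant (arr : List Int) :
    (arr.foldr ngeStep ([], [])).1 = ngeSpec arr ∧
    ∀ v, headOr (popWhileLe v (arr.foldr ngeStep ([], [])).2) = firstGreater v arr := by
  induction arr with
  | nil => exact ⟨rfl, fun v => rfl⟩
  | cons a t ih =>
    obtain ⟨ih1, ih2⟩ := ih
    constructor
    · show (ngeStep a (t.foldr ngeStep ([], []))).1 = _
      have := ih2 a
      simp only [ngeStep, ngeSpec, headOr] at *
      split <;> rename_i h <;> rw [h] at this <;> simp [← this, ih1]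
    · intro v
      show headOr (popWhileLe v (ngeStep a (t.foldr ngeStep ([], []))).2) = _
      simp only [ngeStep]
      by_cases hv : a ≤ v
      · simp only [popWhileLe, hv, if_true, popWhileLe_popWhileLe a v hv, ih2 v,
          firstGreater]
        simp [not_lt.2 hv]
      · simp [popWhileLe, hv, headOr, firstGreater, lt_of_not_ge hv]

lemma nse_invariant (arr : List Int) :
    (arr.foldr nseStep ([], [])).1 = nseSpec arr ∧
    ∀ v, headOr (popWhileGe v (arr.foldr nseStep ([], [])).2) = firstSmaller v arr := by
  induction arr with
  | nil => exact ⟨rfl, fun v => rfl⟩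
  | cons a t ih =>
    obtain ⟨ih1, ih2⟩ := ih
    constructor
    · show (nseStep a (t.foldr nseStep ([], []))).1 = _
      have := ih2 a
      simp only [nseStep, nseSpec, headOr] at *
      split <;> rename_i h <;> rw [h] at this <;> simp [← this, ih1]
    · intro v
      show headOr (popWhileGe v (nseStep a (t.foldr nseStep ([], []))).2) = _
      simp only [nseStep]
      by_cases hv : a ≥ v
      · simp only [popWhileGe, hv, if_true, popWhileGe_popWhileGe a v hv, ih2 v,
          firstSmaller]
        simp [not_lt.2 hv]
      · simp [popWhileGe, hv, headOr, firstSmaller, lt_of_not_ge hv]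

lemma ngeSpec_getD (arr : List Int) (i : Nat) (h : i < arr.length) :
    (ngeSpec arr).getD i 0 = firstGreater (arr.getD i 0) (arr.drop (i + 1)) := by
  induction arr generalizing i with
  | nil => simp at h
  | cons a t ih =>
    cases i with
    | zero => simp [ngeSpec]
    | succ j => simpa [ngeSpec] using ih j (by simpa using h)

lemma nseSpec_getD (arr : List Int) (i : Nat) (h : i < arr.length) :
    (nseSpec arr).getD i 0 = firstSmaller (arr.getD i 0) (arr.drop (i + 1)) := by
  induction arr generalizing i with
  | nil => simp at h
  | cons a t ih =>
    cases i with
    | zero => simp [nseSpec]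
    | succ j => simpa [nseSpec] using ih j (by simpa using h)

lemma firstGreater_mem (v : Int) (t : List Int) (h : firstGreater v t ≠ -1) :
    firstGreater v t ∈ t := by
  induction t with
  | nil => simp [firstGreater] at h
  | cons x xs ih =>
    by_cases hx : v < x
    · simp [firstGreater, hx]
    · simp only [firstGreater, hx, if_false] at h ⊢
      exact List.mem_cons_of_mem _ (ih h)

lemma index?_isSome_of_mem (a : Int) (l : List Int) (h : a ∈ l) :
    ∃ idx, PySem.List.index? l a = some idx ∧ idx < l.length := by
  obtain ⟨idx, hidx⟩ := Option.isSome_iff_exists.1 ((PySem.List.index?_isSome_iff l a).2 h)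
  obtain ⟨hk, -, -⟩ := PySem.List.getElem_of_index?_eq_some hidx
  exact ⟨idx, hidx, hk⟩

lemma foldl_append_map (l : List Nat) (f : Nat → Int) (acc : List Int) :
    l.foldl (fun r i => r ++ [f i]) acc = acc ++ l.map f := by
  induction l generalizing acc with
  | nil => simp
  | cons x xs ih => simp [List.foldl, ih]

-- ===== VERDICT (by name: the statement is the Claim_ definition above) =====
theorem nextSmallerOfNextGreater_spec : Claim_equal_nextSmallerOfNextGreater := by
  intro arr _
  show nextSmallerOfNextGreater arr = nextSmallerOfNextGreater_alt arr
  have hge := (nge_invariant arr).1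
  have hse := (nse_invariant arr).1
  show (List.range arr.length).foldl
      (fun result i =>
        if (nextGreaterA arr).getD i 0 = -1 then result ++ [-1]
        else
          match PySem.List.index? arr ((nextGreaterA arr).getD i 0) with
          | some idx => result ++ [(nextSmallerA arr).getD idx 0]
          | none => result ++ [0]) [] = _
  rw [show (fun (result : List Int) i =>
        if (nextGreaterA arr).getD i 0 = -1 then result ++ [-1]
        else
          match PySem.List.index? arr ((nextGreaterA arr).getD i 0) with
          | some idx => result ++ [(nextSmallerA arr).getD idx 0]
          | none => result ++ [0]) =
      (fun (result : List Int) i => result ++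
        [if (nextGreaterA arr).getD i 0 = -1 then -1
         else
           match PySem.List.index? arr ((nextGreaterA arr).getD i 0) with
           | some idx => (nextSmallerA arr).getD idx 0
           | none => 0]) from by
    funext r i; split
    · rfl
    · split <;> rfl]
  rw [foldl_append_map, List.nil_append]
  apply List.map_congr_left
  intro i hi
  have hi' : i < arr.length := List.mem_range.1 hi
  show (if (nextGreaterA arr).getD i 0 = -1 then (-1 : Int)
        else
          match PySem.List.index? arr ((nextGreaterA arr).getD i 0) with
          | some idx => (nextSmallerA arr).getD idx 0
          | none => 0) =
      (if scanGreater arr (arr.getD i 0) (i + 1) = -1 then -1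
       else
         scanSmaller arr
           (arr.getD ((PySem.List.index? arr (scanGreater arr (arr.getD i 0) (i + 1))).getD 0) 0)
           (((PySem.List.index? arr (scanGreater arr (arr.getD i 0) (i + 1))).getD 0) + 1))
  rw [scanGreater_eq]
  have hg : (nextGreaterA arr).getD i 0 = firstGreater (arr.getD i 0) (arr.drop (i + 1)) := by
    rw [nextGreaterA, hge, ngeSpec_getD arr i hi']
  rw [hg]
  by_cases h1 : firstGreater (arr.getD i 0) (arr.drop (i + 1)) = -1
  · rw [if_pos h1, if_pos h1]
  · rw [if_neg h1, if_neg h1]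
    have hmem : firstGreater (arr.getD i 0) (arr.drop (i + 1)) ∈ arr :=
      List.mem_of_mem_drop (firstGreater_mem _ _ h1)
    obtain ⟨idx, hidx, hlt⟩ := index?_isSome_of_mem _ _ hmem
    rw [hidx]
    show (nextSmallerA arr).getD idx 0 = _
    rw [nextSmallerA, hse, nseSpec_getD arr idx hlt, Option.getD_some, scanSmaller_eq]
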